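-- pv_equiv track=rewrite | github.com/shc2025/maxcalw | crsi_ha_engine.py | streak_days
-- ===== SOURCE A (Python) =====
-- def streak_days(closes):
--     """连续趋势天数: 上涨=+N, 下跌=-N, 平盘=0"""
--     if len(closes) < 2:
--         return [0] * len(closes)
--     s = [0]
--     for i in range(1, len(closes)):
--         if closes[i] is None or closes[i - 1] is None:
--             s.append(0); continue
--         if closes[i] > closes[i - 1]:
--             s.append(1 if s[-1] <= 0 else s[-1] + 1)
--         elif closes[i] < closes[i - 1]:
--             s.append(-1 if s[-1] >= 0 else s[-1] - 1)
--         else: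
--             s.append(0)
--     return s
-- ===== SOURCE B (Python) =====
-- def streak_days(closes):
--     """连续趋势天数: 上涨=+N, 下跌=-N, 平盘=0"""
--     if len(closes) < 2:
--         return [0] * len(closes)
--     # sign table: dirs[i] = direction of day i relative to day i-1 (day 0 -> 0)
--     dirs = [0]
--     for prev, cur in zip(closes, closes[1:]):
--         if prev is None or cur is None or cur == prev:
--             dirs.append(0)
--         else:
--             dirs.append(1 if cur > prev else -1)
--     # run-length expand: zeros for a flat run, 1..k (signed) for a trend run
--     out = []
--     i, n = 0, len(dirs)
--     while i < n:
--         j = i + 1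
--         while j < n and dirs[j] == dirs[i]:
--             j += 1
--         d, k = dirs[i], j - i
--         out.extend([0] * k if d == 0 else [d * m for m in range(1, k + 1)])
--         i = j
--     return out
-- ===== Notes on version B (the rewrite author's own statement) =====
-- stated objective: alternative
-- what changed: Instead of carrying the running streak value through one stateful loop, B first builds a per-day direction table (-1/0/+1) and then run-length expands its maximal runs into 1..k (signed) or zeros.
import Mathlib
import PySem

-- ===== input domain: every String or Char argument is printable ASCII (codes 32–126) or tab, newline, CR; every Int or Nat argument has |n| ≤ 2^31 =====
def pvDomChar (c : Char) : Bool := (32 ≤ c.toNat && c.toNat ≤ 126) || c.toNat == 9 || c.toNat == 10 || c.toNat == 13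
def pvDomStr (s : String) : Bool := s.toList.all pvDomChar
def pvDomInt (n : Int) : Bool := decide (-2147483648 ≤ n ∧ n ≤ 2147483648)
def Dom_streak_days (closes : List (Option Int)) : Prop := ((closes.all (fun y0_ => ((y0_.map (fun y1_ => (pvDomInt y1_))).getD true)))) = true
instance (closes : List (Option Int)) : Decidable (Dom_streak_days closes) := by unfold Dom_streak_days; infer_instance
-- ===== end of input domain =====

-- B replaces A's single stateful streak loop by a direction table plus run-length expansion; objective: alternative decomposition (same O(n) cost).

-- ===== PORT A =====
-- loop body of A's 'for i in range(1, len(closes))' (s[-1] via pyGetD, closes[i] via pyGetD; indices always in range)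
def pvStepA (closes : List (Option Int)) (s : List Int) (i : Int) : List Int :=
  match PySem.List.pyGetD closes i none, PySem.List.pyGetD closes (i - 1) none with
  | some c, some p =>
    if c > p then
      s ++ [if PySem.List.pyGetD s (-1) 0 ≤ 0 then 1 else PySem.List.pyGetD s (-1) 0 + 1]
    else if c < p then
      s ++ [if PySem.List.pyGetD s (-1) 0 ≥ 0 then -1 else PySem.List.pyGetD s (-1) 0 - 1]
    else s ++ [0]
  | _, _ => s ++ [0]

def streak_days (closes : List (Option Int)) : List Int :=
  if closes.length < 2 then List.replicate closes.length 0
  else (PySem.List.pyRange 1 closes.length 1).foldl (pvStepA closes) [0]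

-- ===== PORT B =====
-- loop body of B's 'for prev, cur in zip(closes, closes[1:])'
def pvDirStep (dirs : List Int) (pc : Option Int × Option Int) : List Int :=
  match pc.1, pc.2 with
  | some p, some c => if c = p then dirs ++ [0] else if c > p then dirs ++ [1] else dirs ++ [-1]
  | _, _ => dirs ++ [0]

-- B's outer while over i: structural recursion on the suffix dirs[i:] ; the inner
-- 'while j < n and dirs[j] == dirs[i]' scan is takeWhile/dropWhile on that suffix
def pvRunsExpand : List Int → List Int
  | [] => []
  | d :: ds =>
      let k : Int := 1 + (ds.takeWhile (fun x => x == d)).length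
      (if d = 0 then List.replicate k.toNat 0
       else (PySem.List.pyRange 1 (k + 1) 1).map (fun m => d * m))
        ++ pvRunsExpand (ds.dropWhile (fun x => x == d))
termination_by ds => ds.length
decreasing_by simpa using Nat.lt_succ_of_le (List.length_dropWhile_le _ _)

def streak_days_alt (closes : List (Option Int)) : List Int :=
  if closes.length < 2 then List.replicate closes.length 0
  else pvRunsExpand ((closes.zip closes.tail).foldl pvDirStep [0])

-- ===== PRECONDITION & SPEC =====
def Spec_streak_days (closes : List (Option Int)) (out : List Int) : Prop := out = streak_days_alt closes
instance (closes : List (Option Int)) (out : List Int) : Decidable (Spec_streak_days closes out) := by unfold Spec_streak_days; infer_instance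

-- ===== CLAIM (what is proved, stated in full; the proofs are below) =====
def Claim_equal_streak_days : Prop := ∀ (closes : List (Option Int)), Dom_streak_days closes → Spec_streak_days closes (streak_days closes)

-- ===== LEMMAS AND PROOFS =====

-- direction of a (prev, cur) pair
def pvDir (pc : Option Int × Option Int) : Int :=
  match pc.1, pc.2 with
  | some p, some c => if c = p then 0 else if c > p then 1 else -1
  | _, _ => 0

-- A's streak update as a function of the previous streak value and the direction
def pvStep (v d : Int) : Int :=
  if d = 0 then 0 else if d > 0 then (if v ≤ 0 then 1 else v + 1) else (if v ≥ 0 then -1 else v - 1)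

-- left-to-right scan of pvStep (the canonical meaning both programs compute)
def pvGo (v : Int) : List Int → List Int
  | [] => []
  | d :: ds => pvStep v d :: pvGo (pvStep v d) ds

-- the state entering a run must not already have the run's own sign
def pvOkHead (v : Int) : List Int → Prop
  | [] => True
  | d :: _ => (d = 1 → v ≤ 0) ∧ (d = -1 → 0 ≤ v)

lemma pvDirStep_eq (dirs : List Int) (pc : Option Int × Option Int) :
    pvDirStep dirs pc = dirs ++ [pvDir pc] := by
  rcases pc with ⟨p, c⟩
  cases p <;> cases c <;> simp [pvDirStep, pvDir] <;> split_ifs <;> simp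

lemma pvStepA_eq (closes : List (Option Int)) (s : List Int) (hs : s ≠ []) (i : Int)
    (p c : Option Int) (hp : PySem.List.pyGetD closes (i - 1) none = p)
    (hc : PySem.List.pyGetD closes i none = c) :
    pvStepA closes s i = s ++ [pvStep (s.getLast hs) (pvDir (p, c))] := by
  have hlast := PySem.List.pyGetD_neg_one s 0 hs
  cases p <;> cases c <;>
    simp only [pvStepA, hp, hc, pvDir, pvStep, hlast] <;>
    split_ifs <;> first | omega | simp_all

lemma pvGo_zero_run : ∀ (m : Nat) (t : List Int),
    pvGo 0 (List.replicate m 0 ++ t) = List.replicate m 0 ++ pvGo 0 t := by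
  intro m
  induction m with
  | zero => simp
  | succ n ih => intro t; simp [List.replicate_succ, pvGo, pvStep, ih]

lemma pvGo_pos_run : ∀ (m : Nat) (w : Int) (t : List Int), 1 ≤ w →
    pvGo w (List.replicate m 1 ++ t)
      = (List.range m).map (fun (j : Nat) => w + 1 + (j : Int)) ++ pvGo (w + m) t := by
  intro m
  induction m with
  | zero => intro w t _; simp
  | succ n ih =>
      intro w t hw
      have hstep : pvStep w 1 = w + 1 := by simp [pvStep]; omega
      rw [List.replicate_succ, List.cons_append, pvGo, hstep, ih (w + 1) t (by omega),
        List.range_succ_eq_map]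
      simp only [List.map_cons, Nat.cast_zero, List.map_map, List.cons_append, add_zero]
      congr 1
      congr 1
      · apply List.map_congr_left
        intro j _
        simp only [Function.comp_apply]
        push_cast
        ring
      · congr 1
        push_cast
        ring

lemma pvGo_neg_run : ∀ (m : Nat) (w : Int) (t : List Int), w ≤ -1 →
    pvGo w (List.replicate m (-1) ++ t)
      = (List.range m).map (fun (j : Nat) => w - 1 - (j : Int)) ++ pvGo (w - m) t := by
  intro m
  induction m with
  | zero => intro w t _; simp
  | succ n ih =>
      intro w t hw
      have hstep : pvStep w (-1) = w - 1 := by simp [pvStep]; omega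
      rw [List.replicate_succ, List.cons_append, pvGo, hstep, ih (w - 1) t (by omega),
        List.range_succ_eq_map]
      simp only [List.map_cons, Nat.cast_zero, List.map_map, List.cons_append, sub_zero]
      congr 1
      congr 1
      · apply List.map_congr_left
        intro j _
        simp only [Function.comp_apply]
        push_cast
        ring
      · congr 1
        push_cast
        ring


lemma pvDir_cases (pc : Option Int × Option Int) : pvDir pc = -1 ∨ pvDir pc = 0 ∨ pvDir pc = 1 := by
  rcases pc with ⟨p, c⟩
  cases p <;> cases c <;> simp [pvDir] <;> split_ifs <;> simp_all

lemma pvRunsExpand_eq_go : ∀ (n : Nat) (ds : List Int) (v : Int), ds.length ≤ n →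
    (∀ d ∈ ds, d = -1 ∨ d = 0 ∨ d = 1) → pvOkHead v ds →
    pvRunsExpand ds = pvGo v ds := by
  intro n
  induction n with
  | zero =>
      intro ds v h _ _
      rw [List.length_eq_zero_iff.mp (Nat.le_zero.mp h)]
      simp [pvRunsExpand, pvGo]
  | succ n ih =>
      intro ds v hlen hmem hok
      cases ds with
      | nil => simp [pvRunsExpand, pvGo]
      | cons d t =>
        have hsplit : t.takeWhile (fun x => x == d) ++ t.dropWhile (fun x => x == d) = t :=
          List.takeWhile_append_dropWhile
        have hprerep : t.takeWhile (fun x => x == d)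
            = List.replicate (t.takeWhile (fun x => x == d)).length d :=
          List.eq_replicate_of_mem (fun b hb => by simpa using List.mem_takeWhile_imp hb)
        have hpostlen : (t.dropWhile (fun x => x == d)).length ≤ n := by
          have h1 := List.length_dropWhile_le (fun x => x == d) t
          have h2 : t.length ≤ n := by simpa using Nat.lt_succ_iff.mp (Nat.lt_of_lt_of_le (by simp) hlen)
          omega
        have hpostmem : ∀ x ∈ t.dropWhile (fun x => x == d), x = -1 ∨ x = 0 ∨ x = 1 := by
          intro x hx
          exact hmem x (List.mem_cons_of_mem _ ((List.dropWhile_sublist _).mem hx))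
        have hheadpost : ∀ p ps, t.dropWhile (fun x => x == d) = p :: ps → p ≠ d := by
          intro p ps hp
          have := List.head?_dropWhile_not (fun x => x == d) t
          rw [hp] at this
          simpa using this
        set m := (t.takeWhile (fun x => x == d)).length with hm
        have hshape : d :: t = List.replicate (m + 1) d ++ t.dropWhile (fun x => x == d) := by
          conv_lhs => rw [← hsplit, hprerep]
          simp [List.replicate_succ]
        have hknat : (1 + (m : Int)).toNat = m + 1 := by omega
        simp only [pvRunsExpand]
        rw [← hm]
        rcases hmem d (by simp) with hd | hd | hd
        · -- d = -1 : downward run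
          subst hd
          have hv : 0 ≤ v := (hok.2) rfl
          have hrange : (PySem.List.pyRange 1 (1 + (m : Int) + 1) 1).map (fun j => (-1 : Int) * j)
              = (List.range (m + 1)).map (fun (j : Nat) => -1 - (j : Int)) := by
            rw [PySem.List.pyRange_one]
            have hlen : ((1 : Int) + (m : Int) + 1 - 1).toNat = m + 1 := by omega
            rw [hlen]
            simp only [List.map_map]
            apply List.map_congr_left
            intro j _
            simp only [Function.comp_apply]
            ring
          have hok' : pvOkHead (-1 - (m : Int)) (t.dropWhile (fun x => x == (-1 : Int))) := by
            cases hpost : t.dropWhile (fun x => x == (-1 : Int)) with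
            | nil => trivial
            | cons p ps =>
              refine ⟨fun _ => by omega, fun hp1 => ?_⟩
              exact absurd hp1 (hheadpost p ps hpost)
          have hrec := ih (t.dropWhile (fun x => x == (-1 : Int))) (-1 - (m : Int)) hpostlen hpostmem hok'
          conv_rhs => rw [hshape]
          rw [List.replicate_succ, List.cons_append, pvGo]
          have hstep : pvStep v (-1) = -1 := by simp [pvStep]; omega
          rw [hstep, pvGo_neg_run m (-1) _ (by omega)]
          rw [if_neg (by norm_num : ¬ (-1 : Int) = 0), hrange]
          rw [← hrec, List.range_succ_eq_map]
          simp only [List.map_cons, Nat.cast_zero, List.map_map, List.cons_append, sub_zero]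
          congr 1
          congr 1
          apply List.map_congr_left
          intro j _
          simp only [Function.comp_apply]
          push_cast
          ring
        · -- d = 0 : flat run
          subst hd
          have hok' : pvOkHead 0 (t.dropWhile (fun x => x == (0 : Int))) := by
            cases hpost : t.dropWhile (fun x => x == (0 : Int)) with
            | nil => trivial
            | cons p ps => exact ⟨fun _ => by omega, fun _ => by omega⟩
          have hrec := ih (t.dropWhile (fun x => x == (0 : Int))) 0 hpostlen hpostmem hok'
          conv_rhs => rw [hshape]
          rw [List.replicate_succ, List.cons_append, pvGo]
          have hstep : pvStep v 0 = 0 := by simp [pvStep]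
          rw [hstep, pvGo_zero_run]
          rw [if_pos rfl, hknat]
          simp [List.replicate_succ, ← hrec]
        · -- d = 1 : upward run
          subst hd
          have hv : v ≤ 0 := (hok.1) rfl
          have hrange : (PySem.List.pyRange 1 (1 + (m : Int) + 1) 1).map (fun j => (1 : Int) * j)
              = (List.range (m + 1)).map (fun (j : Nat) => 1 + (j : Int)) := by
            rw [PySem.List.pyRange_one]
            have hlen : ((1 : Int) + (m : Int) + 1 - 1).toNat = m + 1 := by omega
            rw [hlen]
            simp only [List.map_map]
            apply List.map_congr_left
            intro j _
            simp only [Function.comp_apply]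
            ring
          have hok' : pvOkHead (1 + (m : Int)) (t.dropWhile (fun x => x == (1 : Int))) := by
            cases hpost : t.dropWhile (fun x => x == (1 : Int)) with
            | nil => trivial
            | cons p ps =>
              refine ⟨fun hp1 => absurd hp1 (hheadpost p ps hpost), fun _ => by omega⟩
          have hrec := ih (t.dropWhile (fun x => x == (1 : Int))) (1 + (m : Int)) hpostlen hpostmem hok'
          conv_rhs => rw [hshape]
          rw [List.replicate_succ, List.cons_append, pvGo]
          have hstep : pvStep v 1 = 1 := by simp [pvStep]; omega
          rw [hstep, pvGo_pos_run m 1 _ (by omega)]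
          rw [if_neg (by norm_num : ¬ (1 : Int) = 0), hrange, ← hrec,
            List.range_succ_eq_map]
          simp only [List.map_cons, Nat.cast_zero, List.map_map, List.cons_append, add_zero]
          congr 1
          congr 1
          apply List.map_congr_left
          intro j _
          simp only [Function.comp_apply]
          push_cast
          ring

-- the A-side loop computes pvGo over the pairwise directions
lemma A_loop (closes : List (Option Int)) : ∀ (m a : Nat), 1 ≤ a → a + m = closes.length →
    ∀ (s : List Int) (hs : s ≠ []),
    (PySem.List.pyRange (a : Int) (closes.length : Int) 1).foldl (pvStepA closes) s
      = s ++ pvGo (s.getLast hs) (((closes.drop (a - 1)).zip (closes.drop a)).map pvDir) := by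
  intro m
  induction m with
  | zero =>
      intro a ha hm s hs
      rw [PySem.List.pyRange_one_eq_nil (by omega)]
      have h2 : closes.drop a = [] := by rw [List.drop_eq_nil_iff]; omega
      simp [h2, pvGo]
  | succ n ih =>
      intro a ha hm s hs
      have hal : a < closes.length := by omega
      have ham : a - 1 < closes.length := by omega
      have hget_c : PySem.List.pyGetD closes (a : Int) none = closes[a] := by
        simp [PySem.List.pyGetD_natCast, List.getElem?_eq_getElem hal]
      have hget_p : PySem.List.pyGetD closes ((a : Int) - 1) none = closes[a - 1] := by
        have hcast : ((a : Int) - 1) = ((a - 1 : Nat) : Int) := by omega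
        rw [hcast]
        simp [PySem.List.pyGetD_natCast, List.getElem?_eq_getElem ham]
      rw [PySem.List.pyRange_one_cons (by exact_mod_cast (by omega : (a : Int) < (closes.length : Int)))]
      rw [List.foldl_cons, pvStepA_eq closes s hs _ _ _ hget_p hget_c]
      have hcast1 : ((a : Int) + 1) = ((a + 1 : Nat) : Int) := by push_cast; ring
      rw [hcast1, ih (a + 1) (by omega) (by omega) _ (by simp)]
      have hd1 : closes.drop (a - 1) = closes[a - 1] :: closes.drop a := by
        have he : a - 1 + 1 = a := by omega
        rw [List.drop_eq_getElem_cons ham, he]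
      have hd2 : closes.drop a = closes[a] :: closes.drop (a + 1) := List.drop_eq_getElem_cons hal
      have hlast : ∀ (w : Int), (s ++ [w]).getLast (by simp) = w := fun w => List.getLast_concat
      simp only [Nat.add_sub_cancel, hd1, hd2, List.zip_cons_cons, List.map_cons, pvGo, hlast,
        List.append_assoc, List.cons_append, List.nil_append]

lemma dirs_fold (closes : List (Option Int)) :
    (closes.zip closes.tail).foldl pvDirStep [0]
      = 0 :: (closes.zip closes.tail).map pvDir := by
  have hfun : pvDirStep = fun dirs pc => dirs ++ [pvDir pc] := by
    funext dirs pc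
    exact pvDirStep_eq dirs pc
  rw [hfun, PySem.List.foldl_append_singleton_eq_map]
  simp

-- ===== VERDICT (by name: the statement is the Claim_ definition above) =====

theorem streak_days_spec : Claim_equal_streak_days := by
  intro closes _
  unfold Spec_streak_days streak_days streak_days_alt
  by_cases h2 : closes.length < 2
  · simp [h2]
  · simp only [if_neg h2]
    have h1 : 1 + (closes.length - 1) = closes.length := by omega
    have hA := A_loop closes (closes.length - 1) 1 (by omega) h1 [0] (by simp)
    simp only [Nat.cast_one] at hA
    rw [hA, dirs_fold]
    have hmem : ∀ d ∈ 0 :: (closes.zip closes.tail).map pvDir, d = -1 ∨ d = 0 ∨ d = 1 := by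
      intro d hd
      rcases List.mem_cons.mp hd with h | h
      · right; left; exact h
      · obtain ⟨pc, _, rfl⟩ := List.mem_map.mp h
        exact pvDir_cases pc
    rw [pvRunsExpand_eq_go (0 :: (closes.zip closes.tail).map pvDir).length _ 0 le_rfl hmem
      ⟨fun h => by omega, fun h => by omega⟩]
    have hstep0 : pvStep 0 0 = 0 := by simp [pvStep]
    simp [pvGo, hstep0, List.drop_one]
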